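-- pv_equiv track=rewrite | github.com/a-rahimi/wireless-snooping | pyrtlfm/vibecoded.py | find_payload_start
-- ===== SOURCE A (Python) =====
-- from typing import NamedTuple, List, Tuple
--
-- def find_payload_start(bits: List[int]) -> int:
--     # Preamble is 101010... or 010101...
--     # Find first violation (00 or 11) after some initial stability
--
--     consecutive_alternating = 0
--     preamble_found = False
--
--     for i in range(1, len(bits)):
--         if bits[i] != bits[i - 1]:
--             consecutive_alternating += 1
--             if consecutive_alternating > 8:
--                 preamble_found = True
--         else:
--             # Violation found (00 or 11)
--             if preamble_found:
--                 # We found the sync word / payload start.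
--                 # Usually the violation IS the sync word or part of it.
--                 return i
--             consecutive_alternating = 0
--
--     return -1
-- ===== SOURCE B (Python) =====
-- def find_payload_start(bits):
--     # Pass 1: confirmation index = first i where a run of adjacent alternations
--     # (reset to 0 by any equal pair) exceeds 8.
--     count = 0
--     conf = None
--     for i in range(1, len(bits)):
--         if bits[i] != bits[i - 1]:
--             count += 1
--             if count > 8:
--                 conf = i
--                 break
--         else:
--             count = 0
--     if conf is None:
--         return -1
--     # Pass 2: first equal adjacent pair strictly after the confirmation index.
--     for i, (p, b) in enumerate(zip(bits, bits[1:]), 1):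
--         if i > conf and p == b:
--             return i
--     return -1
-- ===== Notes on version B (the rewrite author's own statement) =====
-- stated objective: alternative
-- what changed: A's single loop with a sticky preamble_found flag is decomposed into two independent passes: pass 1 finds the confirmation index (first index where the alternation run, reset on equal pairs, exceeds 8) and stops there; pass 2 returns the first equal adjacent pair strictly after that index.
import Mathlib
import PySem

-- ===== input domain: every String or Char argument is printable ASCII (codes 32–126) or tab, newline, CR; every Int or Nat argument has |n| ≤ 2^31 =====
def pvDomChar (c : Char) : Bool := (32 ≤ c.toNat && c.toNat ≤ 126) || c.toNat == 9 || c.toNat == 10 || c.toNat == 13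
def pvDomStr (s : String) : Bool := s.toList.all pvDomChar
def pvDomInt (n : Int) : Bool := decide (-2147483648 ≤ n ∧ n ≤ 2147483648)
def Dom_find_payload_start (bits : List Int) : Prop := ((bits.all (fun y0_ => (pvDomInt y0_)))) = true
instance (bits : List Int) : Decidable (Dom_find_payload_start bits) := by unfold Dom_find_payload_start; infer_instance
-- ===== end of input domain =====

-- B replaces A's single sticky-flag loop by two passes (find the confirmation
-- index, then the first equal pair strictly after it); objective: alternative
-- decomposition, same O(n) cost.

-- ===== PORT A =====
-- A's loop: prev = bits[i-1], rest = bits[i:], state (count, found), i the Python index.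
def pvA_loop (prev : Int) (rest : List Int) (count : Int) (found : Bool) (i : Int) : Int :=
  match rest with
  | [] => -1
  | b :: tl =>
    if b ≠ prev then
      let count' := count + 1
      let found' := if count' > 8 then true else found
      pvA_loop b tl count' found' (i + 1)
    else
      if found then i else pvA_loop b tl 0 found (i + 1)

def find_payload_start (bits : List Int) : Int :=
  match bits with
  | [] => -1
  | b :: tl => pvA_loop b tl 0 false 1

-- ===== PORT B =====
-- Pass 1 of Source B: first index i where the alternation run exceeds 8 (none if never).
def pvB_confirm (prev : Int) (rest : List Int) (count : Int) (i : Int) : Option Int :=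
  match rest with
  | [] => none
  | b :: tl =>
    if b ≠ prev then
      if count + 1 > 8 then some i else pvB_confirm b tl (count + 1) (i + 1)
    else
      pvB_confirm b tl 0 (i + 1)

-- Pass 2 of Source B: first index i (scanning adjacent pairs from i = 1) with
-- i > conf and bits[i] = bits[i-1]; -1 if none.
def pvB_viol (prev : Int) (rest : List Int) (i : Int) (conf : Int) : Int :=
  match rest with
  | [] => -1
  | b :: tl => if i > conf ∧ b = prev then i else pvB_viol b tl (i + 1) conf

def find_payload_start_alt (bits : List Int) : Int :=
  match bits with
  | [] => -1
  | b :: tl =>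
    match pvB_confirm b tl 0 1 with
    | none => -1
    | some conf => pvB_viol b tl 1 conf

-- ===== PRECONDITION & SPEC =====
def Spec_find_payload_start (bits : List Int) (out : Int) : Prop := out = find_payload_start_alt bits
instance (bits : List Int) (out : Int) : Decidable (Spec_find_payload_start bits out) := by unfold Spec_find_payload_start; infer_instance

-- ===== CLAIM (what is proved, stated in full; the proofs are below) =====
def Claim_equal_find_payload_start : Prop := ∀ (bits : List Int), Dom_find_payload_start bits → Spec_find_payload_start bits (find_payload_start bits)

-- ===== LEMMAS AND PROOFS =====

-- A confirmation index returned by pass 1 is at least the starting index.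
theorem pvB_confirm_ge (rest : List Int) : ∀ (prev count i c : Int),
    pvB_confirm prev rest count i = some c → i ≤ c := by
  induction rest with
  | nil => intro prev count i c h; simp [pvB_confirm] at h
  | cons b tl ih =>
    intro prev count i c h
    simp only [pvB_confirm] at h
    split_ifs at h with h1 h2
    · cases h; exact le_refl i
    · exact le_trans (by omega) (ih b (count + 1) (i + 1) c h)
    · exact le_trans (by omega) (ih b 0 (i + 1) c h)

-- Once the flag is set, A just returns the first equal adjacent pair; pass 2
-- does the same when the index is already past conf.
theorem pvA_found (rest : List Int) : ∀ (prev count i conf : Int), conf < i →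
    pvA_loop prev rest count true i = pvB_viol prev rest i conf := by
  induction rest with
  | nil => intro prev count i conf _; rfl
  | cons b tl ih =>
    intro prev count i conf hlt
    simp only [pvA_loop, pvB_viol]
    by_cases hb : b = prev
    · simp [hb, hlt]
    · simp [hb, hlt]
      exact ih b _ (i + 1) conf (by omega)

-- Main invariant: the unconfirmed loop of A equals "pass 1 then pass 2".
theorem pvA_main (rest : List Int) : ∀ (prev count i : Int),
    pvA_loop prev rest count false i =
      (match pvB_confirm prev rest count i with
       | none => -1
       | some conf => pvB_viol prev rest i conf) := by
  induction rest with
  | nil => intro prev count i; rfl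
  | cons b tl ih =>
    intro prev count i
    simp only [pvA_loop, pvB_confirm, pvB_viol]
    by_cases hb : b = prev
    · -- equal pair: A resets, pass 1 resets, pass 2 skips (i ≤ conf).
      subst hb
      simp only [ne_eq, not_true_eq_false, if_false]
      rw [ih]
      rcases hconf : pvB_confirm b tl 0 (i + 1) with _ | conf
      · simp
      · have hge := pvB_confirm_ge tl b 0 (i + 1) conf hconf
        have hno : ¬ conf < i := by omega
        simp [hno]
    · by_cases hc : count + 1 > 8
      · simp [hb, hc, pvA_found tl b (count+1) (i+1) i (by omega)]
      · simp only [hb, hc, ne_eq, not_false_eq_true, if_true, if_false]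
        rw [ih]
        rcases hconf : pvB_confirm b tl (count + 1) (i + 1) with _ | conf
        · simp
        · simp

-- ===== VERDICT (by name: the statement is the Claim_ definition above) =====
theorem find_payload_start_spec : Claim_equal_find_payload_start := by
  intro bits _
  unfold Spec_find_payload_start find_payload_start find_payload_start_alt
  match bits with
  | [] => rfl
  | b :: tl => exact pvA_main tl b 0 1
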